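-- pv_equiv track=rewrite | github.com/SanatP123/privacy_policy_analyzer | Evaluations/BERT Model/Evaluations/ gdpr_compliance_bert.py | generate_pseudo_labels
-- ===== SOURCE A (Python) =====
-- def generate_pseudo_labels(policy_text, gdpr_phrases):
--     labels = []
--     for criterion, phrases in gdpr_phrases.items():
--         if all(phrase in policy_text.lower() for phrase in phrases):
--             labels.append(1)
--         else:
--             labels.append(0)
--     return labels
-- ===== SOURCE B (Python) =====
-- def generate_pseudo_labels(policy_text, gdpr_phrases):
--     # Index the text once: collect every substring of the text whose length is
--     # one of the phrase lengths, then answer each criterion by set lookups.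
--     text = policy_text.lower()
--     n = len(text)
--     lengths = {len(p) for phrases in gdpr_phrases.values() for p in phrases}
--     grams = {text[i:i + L] for L in lengths for i in range(n - L + 1)}
--     return [1 if all(p in grams for p in phrases) else 0 for phrases in gdpr_phrases.values()]
-- ===== Notes on version B (the rewrite author's own statement) =====
-- stated objective: faster
-- what changed: B indexes the text once into a set of all its substrings of the occurring phrase lengths and answers every criterion by pure set lookups, instead of A's one substring search (each with a fresh lowercase of the whole text) per phrase of every criterion.
import Mathlib
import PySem

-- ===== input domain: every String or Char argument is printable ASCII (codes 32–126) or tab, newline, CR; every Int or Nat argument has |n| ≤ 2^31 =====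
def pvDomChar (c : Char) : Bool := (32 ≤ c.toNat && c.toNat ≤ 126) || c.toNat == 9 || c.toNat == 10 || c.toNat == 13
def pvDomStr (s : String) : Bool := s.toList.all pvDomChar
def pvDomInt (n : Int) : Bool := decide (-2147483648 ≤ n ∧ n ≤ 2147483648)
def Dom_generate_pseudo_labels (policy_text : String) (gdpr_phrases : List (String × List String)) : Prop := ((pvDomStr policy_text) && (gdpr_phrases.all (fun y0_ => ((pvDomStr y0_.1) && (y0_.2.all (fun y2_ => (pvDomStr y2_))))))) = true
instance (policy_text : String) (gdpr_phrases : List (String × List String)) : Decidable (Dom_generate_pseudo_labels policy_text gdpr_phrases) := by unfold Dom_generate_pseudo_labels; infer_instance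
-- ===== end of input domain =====

-- B indexes the text once into the set of all its substrings of the occurring phrase
-- lengths and answers every criterion by set lookups, instead of one substring search
-- (with a fresh lowercase of the text) per phrase per criterion (objective: alternative).


-- ===== PORT A =====
-- labels = []; for criterion, phrases in gdpr_phrases.items(): append 1 iff all phrases are in policy_text.lower()
def generate_pseudo_labels (policy_text : String) (gdpr_phrases : List (String × List String)) : List Int :=
  gdpr_phrases.foldl
    (fun labels cp =>
      labels ++ [if cp.2.all (fun phrase => PySem.Str.isIn phrase (PySem.Str.lower policy_text)) then (1 : Int) else 0])
    []

-- ===== PORT B =====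
-- text = policy_text.lower(); lengths = {len(p) …}; grams = {text[i:i+L] for L in lengths for i in range(n-L+1)};
-- labels by 'p in grams' lookups. text[i:i+L] with 0 ≤ i, 0 ≤ L is exactly (text.toList.drop i.toNat).take L.toNat;
-- grams holds the substrings as List Char (Python str equality = char-list equality); iterating the set 'lengths'
-- only builds another set, so the result is order-independent.
def generate_pseudo_labels_alt (policy_text : String) (gdpr_phrases : List (String × List String)) : List Int :=
  let text := PySem.Str.lower policy_text
  let n : Int := PySem.Str.len text
  let lengths : PySem.Set Int :=
    PySem.Set.ofList (gdpr_phrases.flatMap (fun cp => cp.2.map (fun p => PySem.Str.len p)))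
  let grams : PySem.Set (List Char) :=
    lengths.foldl
      (fun g L => (PySem.List.pyRange 0 (n - L + 1) 1).foldl
        (fun g i => PySem.Set.add g ((text.toList.drop i.toNat).take L.toNat)) g)
      PySem.Set.empty
  gdpr_phrases.map (fun cp => if cp.2.all (fun p => PySem.Set.contains grams p.toList) then (1 : Int) else 0)

-- ===== PRECONDITION & SPEC =====
def Spec_generate_pseudo_labels (policy_text : String) (gdpr_phrases : List (String × List String)) (out : List Int) : Prop := out = generate_pseudo_labels_alt policy_text gdpr_phrases
instance (policy_text : String) (gdpr_phrases : List (String × List String)) (out : List Int) : Decidable (Spec_generate_pseudo_labels policy_text gdpr_phrases out) := by unfold Spec_generate_pseudo_labels; infer_instance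

-- ===== CLAIM =====
def Claim_equal_generate_pseudo_labels : Prop := ∀ (policy_text : String) (gdpr_phrases : List (String × List String)), Dom_generate_pseudo_labels policy_text gdpr_phrases → Spec_generate_pseudo_labels policy_text gdpr_phrases (generate_pseudo_labels policy_text gdpr_phrases)

-- ===== LEMMAS AND PROOFS =====

-- membership in the grams built for ONE length L
theorem pvGramsInner_mem (tl : List Char) (L : Int) (l : List Int)
    (g : PySem.Set (List Char)) (q : List Char) :
    q ∈ l.foldl (fun g i => PySem.Set.add g ((tl.drop i.toNat).take L.toNat)) g
      ↔ q ∈ g ∨ ∃ i ∈ l, (tl.drop i.toNat).take L.toNat = q := by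
  induction l generalizing g with
  | nil => simp
  | cons i l ih =>
    simp only [List.foldl_cons, ih, PySem.Set.mem_add, List.mem_cons]
    constructor
    · rintro ((h | h) | ⟨j, hj, hq⟩)
      · exact Or.inl h
      · exact Or.inr ⟨i, Or.inl rfl, h.symm⟩
      · exact Or.inr ⟨j, Or.inr hj, hq⟩
    · rintro (h | ⟨j, (rfl | hj), hq⟩)
      · exact Or.inl (Or.inl h)
      · exact Or.inl (Or.inr hq.symm)
      · exact Or.inr ⟨j, hj, hq⟩

-- membership in the full grams index
theorem pvGrams_mem (tl : List Char) (n : Int) (Ls : List Int)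
    (g : PySem.Set (List Char)) (q : List Char) :
    q ∈ Ls.foldl
        (fun g L => (PySem.List.pyRange 0 (n - L + 1) 1).foldl
          (fun g i => PySem.Set.add g ((tl.drop i.toNat).take L.toNat)) g) g
      ↔ q ∈ g ∨ ∃ L ∈ Ls, ∃ i ∈ PySem.List.pyRange 0 (n - L + 1) 1,
          (tl.drop i.toNat).take L.toNat = q := by
  induction Ls generalizing g with
  | nil => simp
  | cons L Ls ih =>
    simp only [List.foldl_cons, ih, pvGramsInner_mem, List.mem_cons]
    constructor
    · rintro ((h | ⟨i, hi, hq⟩) | ⟨L', hL', hex⟩)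
      · exact Or.inl h
      · exact Or.inr ⟨L, Or.inl rfl, i, hi, hq⟩
      · exact Or.inr ⟨L', Or.inr hL', hex⟩
    · rintro (h | ⟨L', (rfl | hL'), hex⟩)
      · exact Or.inl (Or.inl h)
      · exact Or.inl (Or.inr hex)
      · exact Or.inr ⟨L', hL', hex⟩

-- all over a list is determined pointwise
theorem pvAll_congr {α : Type} (l : List α) (f g : α → Bool) (h : ∀ x ∈ l, f x = g x) :
    l.all f = l.all g := by
  induction l with
  | nil => rfl
  | cons x xs ih =>
    simp only [List.all_cons, h x (List.mem_cons_self ..),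
      ih (fun y hy => h y (List.mem_cons_of_mem _ hy))]

-- the grams index answers every phrase whose length is indexed with the substring test
theorem pvGram_contains (text : String) (Ls : List Int) (p : String)
    (hL : (PySem.Str.len p) ∈ Ls) :
    PySem.Set.contains
      (Ls.foldl
        (fun g L => (PySem.List.pyRange 0 (PySem.Str.len text - L + 1) 1).foldl
          (fun g i => PySem.Set.add g ((text.toList.drop i.toNat).take L.toNat)) g)
        PySem.Set.empty) p.toList
      = PySem.Str.isIn p text := by
  by_cases hin : PySem.Str.isIn p text = true
  · rw [hin, PySem.Set.contains_iff, pvGrams_mem]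
    have hinf : ∃ j, p.toList <+: text.toList.drop j := by
      rw [PySem.Chars.exists_prefix_drop_iff_isIn]
      simpa using hin
    obtain ⟨j, hj⟩ := hinf
    have hlen : (PySem.Str.len p) = (p.toList.length : Int) := by simp
    have hn : (PySem.Str.len text) = (text.toList.length : Int) := by simp
    by_cases hjle : j ≤ text.toList.length
    · have hple : p.toList.length ≤ (text.toList.drop j).length := hj.length_le
      rw [List.length_drop] at hple
      refine Or.inr ⟨PySem.Str.len p, hL, (j : Int), ?_, ?_⟩
      · rw [PySem.List.mem_pyRange_one, hlen, hn]
        constructor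
        · positivity
        · omega
      · rw [hlen]
        simp only [Int.toNat_natCast]
        exact (List.prefix_iff_eq_take.mp hj).symm
    · -- j past the end: the prefix of [] is [], so p is empty and is the gram at i = 0
      have hnil : text.toList.drop j = [] := List.drop_eq_nil_of_le (by omega)
      rw [hnil] at hj
      have hpnil : p.toList = [] := List.prefix_nil.mp hj
      refine Or.inr ⟨PySem.Str.len p, hL, 0, ?_, ?_⟩
      · rw [PySem.List.mem_pyRange_one, hlen, hn, hpnil]
        simp only [List.length_nil, Nat.cast_zero]
        constructor
        · rfl
        · have : (0 : Int) ≤ (text.toList.length : Int) := by positivity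
          omega
      · rw [hlen, hpnil]
        simp
  · rw [Bool.eq_false_iff.mpr hin, Bool.eq_false_iff]
    intro h
    rw [PySem.Set.contains_iff, pvGrams_mem] at h
    rcases h with h | ⟨L, _, i, hi, hq⟩
    · simp [PySem.Set.empty] at h
    · apply hin
      have hpre : p.toList <+: text.toList.drop i.toNat := by
        rw [← hq]; exact List.take_prefix _ _
      have := PySem.Chars.exists_prefix_drop_iff_isIn p.toList text.toList
      simpa using this.mp ⟨i.toNat, hpre⟩

-- ===== VERDICT =====
theorem generate_pseudo_labels_spec : Claim_equal_generate_pseudo_labels := by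
  intro pt gp _
  unfold Spec_generate_pseudo_labels generate_pseudo_labels generate_pseudo_labels_alt
  rw [PySem.List.foldl_append_singleton_eq_map]
  apply List.map_congr_left
  intro cp hcp
  have : cp.2.all (fun p => PySem.Str.isIn p (PySem.Str.lower pt))
      = cp.2.all (fun p =>
          PySem.Set.contains
            ((PySem.Set.ofList (gp.flatMap (fun cp => cp.2.map (fun p => PySem.Str.len p)))).foldl
              (fun g L => (PySem.List.pyRange 0 (PySem.Str.len (PySem.Str.lower pt) - L + 1) 1).foldl
                (fun g i => PySem.Set.add g (((PySem.Str.lower pt).toList.drop i.toNat).take L.toNat)) g)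
              PySem.Set.empty) p.toList) := by
    apply pvAll_congr
    intro p hp
    refine (pvGram_contains (PySem.Str.lower pt) _ p ?_).symm
    rw [PySem.Set.mem_ofList]
    exact List.mem_flatMap.mpr ⟨cp, hcp, List.mem_map.mpr ⟨p, hp, rfl⟩⟩
  rw [this]
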